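-- pv_equiv track=rewrite | github.com/wonjw3638/SWEA-Python-Study | Day04/4837_부분집합의합/4837_김지원.py | count
-- ===== SOURCE A (Python) =====
-- def count(N, num):
--     cnt = 0
--     while num > 0 :
--         cnt += num % 2  # 나머지 더하기
--         num = num // 2
--
--     if cnt == N:  # 1의 개수가 N개면 True
--         return True
--     else:
--         return False
-- ===== SOURCE B (Python) =====
-- def count(N, num):
--     # Brian Kernighan: clear the lowest set bit once per 1-bit.
--     cnt = 0
--     while num > 0:
--         num &= num - 1
--         cnt += 1
--     return cnt == N
-- ===== Notes on version B (the rewrite author's own statement) =====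
-- stated objective: alternative
-- what changed: Replaces the per-bit divide-and-remainder loop (one iteration per bit position of num) with Brian Kernighan's bit-clearing loop num &= num - 1 (one iteration per set bit).
import Mathlib
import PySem

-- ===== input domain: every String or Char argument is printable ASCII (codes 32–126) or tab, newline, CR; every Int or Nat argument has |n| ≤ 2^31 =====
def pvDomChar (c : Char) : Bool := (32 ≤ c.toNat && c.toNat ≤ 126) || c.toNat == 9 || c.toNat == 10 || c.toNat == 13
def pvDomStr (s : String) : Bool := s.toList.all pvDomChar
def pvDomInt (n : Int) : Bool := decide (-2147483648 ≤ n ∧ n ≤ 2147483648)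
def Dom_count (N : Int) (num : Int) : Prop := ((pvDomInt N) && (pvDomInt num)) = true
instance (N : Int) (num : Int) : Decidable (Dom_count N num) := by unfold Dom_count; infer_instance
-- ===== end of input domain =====

-- B replaces A's per-bit divide/remainder loop with Brian Kernighan's `num &= num - 1` loop (one iteration per set bit); same results.

-- ===== PORT A =====
-- while num > 0: cnt += num % 2; num = num // 2
def countLoop (num : Int) (cnt : Int) : Int :=
  if _h : num > 0 then
    countLoop (PySem.Int.floordiv num 2) (cnt + PySem.Int.mod num 2)
  else cnt
termination_by num.toNat
decreasing_by
  rw [PySem.Int.floordiv_eq_ediv_of_pos (by omega)]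
  omega

def count (N : Int) (num : Int) : Bool :=
  if countLoop num 0 = N then true else false

-- ===== PORT B =====
-- while num > 0: num &= num - 1; cnt += 1
def kernLoop (num : Int) (cnt : Int) : Int :=
  if h : num > 0 then
    kernLoop (PySem.Int.band num (num - 1)) (cnt + 1)
  else cnt
termination_by num.toNat
decreasing_by
  have hb := PySem.Int.band_natCast num.toNat (num.toNat - 1)
  have h2 : ((num.toNat - 1 : Nat) : Int) = num - 1 := by omega
  have h1 : ((num.toNat : Nat) : Int) = num := by omega
  rw [h2, h1] at hb
  rw [hb]
  have := Nat.and_le_right (n := num.toNat) (m := num.toNat - 1)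
  omega

def count_alt (N : Int) (num : Int) : Bool :=
  decide (kernLoop num 0 = N)

-- ===== PRECONDITION & SPEC =====
def Spec_count (N : Int) (num : Int) (out : Bool) : Prop := out = count_alt N num
instance (N : Int) (num : Int) (out : Bool) : Decidable (Spec_count N num out) := by unfold Spec_count; infer_instance

-- ===== CLAIM (what is proved, stated in full; the proofs are below) =====
def Claim_equal_count : Prop := ∀ (N : Int) (num : Int), Dom_count N num → Spec_count N num (count N num)

-- ===== LEMMAS AND PROOFS =====

-- popcount of a natural number, the common value both loops compute
def pop (n : Nat) : Nat :=
  if n = 0 then 0 else n % 2 + pop (n / 2)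

theorem pop_zero : pop 0 = 0 := by simp [pop]

theorem pop_even (k : Nat) : pop (2 * k) = pop k := by
  rcases Nat.eq_zero_or_pos k with hk | hk
  · simp [hk]
  · rw [pop, if_neg (by omega)]
    have h1 : (2 * k) % 2 = 0 := by omega
    have h2 : (2 * k) / 2 = k := by omega
    rw [h1, h2, Nat.zero_add]

theorem pop_odd (k : Nat) : pop (2 * k + 1) = pop k + 1 := by
  rw [pop, if_neg (by omega)]
  have h1 : (2 * k + 1) % 2 = 1 := by omega
  have h2 : (2 * k + 1) / 2 = k := by omega
  rw [h1, h2]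
  omega

theorem land_odd_pred (k : Nat) : (2 * k + 1) &&& (2 * k) = 2 * k := by
  apply Nat.eq_of_testBit_eq
  intro i
  cases i with
  | zero =>
    simp [Nat.testBit_zero]
  | succ j =>
    have h1 : (2 * k + 1) / 2 = k := by omega
    have h2 : (2 * k) / 2 = k := by omega
    simp only [Nat.testBit_land]
    simp [Nat.testBit_succ, h1, h2]

theorem land_even_pred (k : Nat) (hk : 0 < k) :
    (2 * k) &&& (2 * k - 1) = 2 * (k &&& (k - 1)) := by
  apply Nat.eq_of_testBit_eq
  intro i
  cases i with
  | zero =>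
    simp [Nat.testBit_zero]
  | succ j =>
    have h1 : (2 * k) / 2 = k := by omega
    have h2 : (2 * k - 1) / 2 = k - 1 := by omega
    simp only [Nat.testBit_land]
    simp [Nat.testBit_succ, h1, h2]

-- Kernighan's invariant: clearing the lowest set bit drops popcount by one
theorem pop_land_pred (m : Nat) (hm : 0 < m) : pop (m &&& (m - 1)) + 1 = pop m := by
  induction m using Nat.strong_induction_on with
  | _ m ih =>
    rcases Nat.mod_two_eq_zero_or_one m with h2 | h2
    · -- m even, m = 2k with k > 0
      have hm' : m = 2 * (m / 2) := by omega
      have hk' : 0 < m / 2 := by omega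
      rw [hm', land_even_pred _ hk', pop_even, pop_even]
      exact ih (m / 2) (by omega) hk'
    · -- m odd, m = 2k + 1
      have hm' : m = 2 * (m / 2) + 1 := by omega
      rw [hm', show 2 * (m / 2) + 1 - 1 = 2 * (m / 2) from rfl,
          land_odd_pred, pop_even, pop_odd]

theorem countLoop_eq (n : Nat) : ∀ cnt : Int, countLoop (↑n) cnt = cnt + ↑(pop n) := by
  induction n using Nat.strong_induction_on with
  | _ n ih =>
    intro cnt
    rcases Nat.eq_zero_or_pos n with hn | hn
    · subst hn
      rw [countLoop, pop_zero]
      simp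
    · rw [countLoop, dif_pos (by exact_mod_cast hn)]
      have hfd : PySem.Int.floordiv (↑n) 2 = ((n / 2 : Nat) : Int) := by
        rw [PySem.Int.floordiv_eq_ediv_of_pos (by omega)]
        omega
      have hmd : PySem.Int.mod (↑n) 2 = ((n % 2 : Nat) : Int) := by
        rw [PySem.Int.mod_eq_emod_of_pos (by omega)]
        omega
      rw [hfd, hmd, ih (n / 2) (by omega)]
      conv_rhs => rw [pop]
      rw [if_neg (by omega)]
      push_cast
      ring

theorem kernLoop_eq (n : Nat) : ∀ cnt : Int, kernLoop (↑n) cnt = cnt + ↑(pop n) := by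
  induction n using Nat.strong_induction_on with
  | _ n ih =>
    intro cnt
    rcases Nat.eq_zero_or_pos n with hn | hn
    · subst hn
      rw [kernLoop, pop_zero]
      simp
    · rw [kernLoop, dif_pos (by exact_mod_cast hn)]
      have h2 : (↑n : Int) - 1 = ((n - 1 : Nat) : Int) := by omega
      rw [h2, PySem.Int.band_natCast]
      have hlt : n &&& (n - 1) < n := by
        have := Nat.and_le_right (n := n) (m := n - 1)
        omega
      rw [ih _ hlt]
      have := pop_land_pred n hn
      omega

theorem loops_agree (num : Int) : countLoop num 0 = kernLoop num 0 := by
  rcases le_or_gt num 0 with h | h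
  · rw [countLoop, kernLoop, dif_neg (by omega), dif_neg (by omega)]
  · have : num = ((num.toNat : Nat) : Int) := by omega
    rw [this, countLoop_eq, kernLoop_eq]

-- ===== VERDICT (by name: the statement is the Claim_ definition above) =====
theorem count_spec : Claim_equal_count := by
  intro N num _
  unfold Spec_count count count_alt
  rw [loops_agree]
  by_cases h : kernLoop num 0 = N <;> simp [h]
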